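-- pv_equiv track=rewrite | github.com/CareNetProject/documentation | calc.py | count_reverse_pairs
-- ===== SOURCE A (Python) =====
-- def count_reverse_pairs(data):
--     tuple_set = set()
--     for entry in data:
--         if len(entry) >= 2:
--             pair = (entry[0].strip(), entry[1].strip())
--             tuple_set.add(pair)
--
--     pair_counts = {}
--     for entry in data:
--         if len(entry) >= 2:
--             pair = (entry[1].strip(), entry[0].strip())
--             if pair in tuple_set:
--                 pair_counts[pair] = 1
--
--     return pair_counts
-- ===== SOURCE B (Python) =====
-- def count_reverse_pairs(data):
--     # Group stripped pairs by their unordered canonical form; a pair's reverse is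
--     # present exactly when its bucket holds both orientations (or it is a palindrome).
--     buckets = {}
--     for e in data:
--         if len(e) >= 2:
--             a, b = e[0].strip(), e[1].strip()
--             key = (a, b) if a <= b else (b, a)
--             bucket = buckets.setdefault(key, [])
--             if (a, b) not in bucket:
--                 bucket.append((a, b))
--     symmetric = set()
--     for key, bucket in buckets.items():
--         if len(bucket) == 2 or key[0] == key[1]:
--             symmetric.update(bucket)
--     return {(e[1].strip(), e[0].strip()): 1
--             for e in data
--             if len(e) >= 2 and (e[1].strip(), e[0].strip()) in symmetric}
-- ===== Notes on version B (the rewrite author's own statement) =====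
-- stated objective: alternative
-- what changed: B decides which reversed pairs to keep by grouping the stripped pairs into buckets keyed by their unordered canonical form and qualifying buckets that contain both orientations (or a palindrome), instead of A's forward-pair set with a per-entry membership test of the reversal.
import Mathlib
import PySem

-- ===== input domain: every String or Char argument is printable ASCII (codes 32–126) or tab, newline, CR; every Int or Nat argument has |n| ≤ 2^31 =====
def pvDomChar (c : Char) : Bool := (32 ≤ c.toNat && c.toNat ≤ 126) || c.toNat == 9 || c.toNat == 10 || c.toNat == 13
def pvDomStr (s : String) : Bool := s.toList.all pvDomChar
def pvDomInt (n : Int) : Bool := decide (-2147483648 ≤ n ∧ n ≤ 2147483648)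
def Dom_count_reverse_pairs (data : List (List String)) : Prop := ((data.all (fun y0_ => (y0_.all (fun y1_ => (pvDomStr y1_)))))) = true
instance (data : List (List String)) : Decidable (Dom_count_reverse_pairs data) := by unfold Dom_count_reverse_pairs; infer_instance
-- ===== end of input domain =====

-- B replaces A's forward-pair set and membership test of the reversal by grouping the stripped pairs
-- into buckets keyed by their unordered canonical form and qualifying the buckets that hold both
-- orientations (or a palindrome); objective: alternative.

-- ===== PORT A =====
def count_reverse_pairs (data : List (List String)) : List (String × String × Int) :=
  -- tuple_set = set(); for entry in data: if len(entry) >= 2: tuple_set.add((entry[0].strip(), entry[1].strip()))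
  -- the guard 2 ≤ entry.length keeps both indexings in range, so pyGetD's default is never used
  let tuple_set : PySem.Set (String × String) :=
    data.foldl (fun s entry =>
      if 2 ≤ entry.length then
        PySem.Set.add s (PySem.Str.strip (PySem.List.pyGetD entry 0 ""),
                         PySem.Str.strip (PySem.List.pyGetD entry 1 ""))
      else s) PySem.Set.empty
  -- pair_counts = {}; for entry in data: if len(entry) >= 2: pair = reversed stripped pair; if pair in tuple_set: pair_counts[pair] = 1
  let pair_counts : PySem.Dict (String × String) Int :=
    data.foldl (fun d entry =>
      if 2 ≤ entry.length then
        let pair := (PySem.Str.strip (PySem.List.pyGetD entry 1 ""),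
                     PySem.Str.strip (PySem.List.pyGetD entry 0 ""))
        if PySem.Set.contains tuple_set pair then d.insert pair 1 else d
      else d) PySem.Dict.empty
  pair_counts.items.map (fun q => (q.1.1, q.1.2, q.2))

-- ===== PORT B =====
def count_reverse_pairs_alt (data : List (List String)) : List (String × String × Int) :=
  -- buckets = {}; for e in data: if len(e) >= 2: a, b = strips; key = (a,b) if a <= b else (b,a);
  --   bucket = buckets.setdefault(key, []); if (a,b) not in bucket: bucket.append((a,b))
  -- (setdefault + in-place list append = getD then insert at the same key, position kept)
  let buckets : PySem.Dict (String × String) (List (String × String)) :=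
    data.foldl (fun d e =>
      if 2 ≤ e.length then
        let a := PySem.Str.strip (PySem.List.pyGetD e 0 "")
        let b := PySem.Str.strip (PySem.List.pyGetD e 1 "")
        let key := if a ≤ b then (a, b) else (b, a)
        let bucket := d.getD key []
        if (a, b) ∈ bucket then d else d.insert key (bucket ++ [(a, b)])
      else d) PySem.Dict.empty
  -- symmetric = set(); for key, bucket in buckets.items(): if len(bucket) == 2 or key[0] == key[1]: symmetric.update(bucket)
  let symmetric : PySem.Set (String × String) :=
    buckets.items.foldl (fun s kb =>
      if kb.2.length == 2 || kb.1.1 == kb.1.2 then PySem.Set.update s kb.2 else s)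
      PySem.Set.empty
  -- {(e[1].strip(), e[0].strip()): 1 for e in data if len(e) >= 2 and (e[1].strip(), e[0].strip()) in symmetric}
  let result : PySem.Dict (String × String) Int :=
    data.foldl (fun d e =>
      if 2 ≤ e.length then
        let p := (PySem.Str.strip (PySem.List.pyGetD e 1 ""),
                  PySem.Str.strip (PySem.List.pyGetD e 0 ""))
        if PySem.Set.contains symmetric p then d.insert p 1 else d
      else d) PySem.Dict.empty
  result.items.map (fun q => (q.1.1, q.1.2, q.2))

-- ===== PRECONDITION & SPEC =====
def Spec_count_reverse_pairs (data : List (List String)) (out : List (String × String × Int)) : Prop := out = count_reverse_pairs_alt data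
instance (data : List (List String)) (out : List (String × String × Int)) : Decidable (Spec_count_reverse_pairs data out) := by unfold Spec_count_reverse_pairs; infer_instance

-- ===== CLAIM (what is proved, stated in full; the proofs are below) =====
def Claim_equal_count_reverse_pairs : Prop := ∀ (data : List (List String)), Dom_count_reverse_pairs data → Spec_count_reverse_pairs data (count_reverse_pairs data)

-- ===== LEMMAS AND PROOFS =====

-- the forward stripped pairs of the qualifying entries, in data order
def pvFwd (data : List (List String)) : List (String × String) :=
  data.filterMap (fun e =>
    if 2 ≤ e.length then
      some (PySem.Str.strip (PySem.List.pyGetD e 0 ""),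
            PySem.Str.strip (PySem.List.pyGetD e 1 ""))
    else none)

-- canonical (sorted) form of a pair, B's bucket key
def pvCanon (p : String × String) : String × String := if p.1 ≤ p.2 then p else (p.2, p.1)

-- B's bucket-building step, as a function of the forward pair
def pvStep (d : PySem.Dict (String × String) (List (String × String)))
    (p : String × String) : PySem.Dict (String × String) (List (String × String)) :=
  if p ∈ d.getD (pvCanon p) [] then d
  else d.insert (pvCanon p) (d.getD (pvCanon p) [] ++ [p])

-- every 'for entry in data: if len(entry) >= 2: <g on the stripped pair>' loop is a fold over pvFwd
lemma pv_fold_entries {β : Type} (g : β → (String × String) → β) :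
    ∀ (data : List (List String)) (acc : β),
      data.foldl (fun acc e =>
        if 2 ≤ e.length then
          g acc (PySem.Str.strip (PySem.List.pyGetD e 0 ""),
                 PySem.Str.strip (PySem.List.pyGetD e 1 ""))
        else acc) acc
      = (pvFwd data).foldl g acc := by
  intro data
  induction data with
  | nil => intro acc; rfl
  | cons e t ih =>
    intro acc
    by_cases h : 2 ≤ e.length
    · have hp : pvFwd (e :: t) = (PySem.Str.strip (PySem.List.pyGetD e 0 ""),
          PySem.Str.strip (PySem.List.pyGetD e 1 "")) :: pvFwd t := by
        simp [pvFwd, h]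
      rw [hp, List.foldl_cons, List.foldl_cons, if_pos h, ih]
    · have hp : pvFwd (e :: t) = pvFwd t := by simp [pvFwd, h]
      rw [hp, List.foldl_cons, if_neg h, ih]

-- the canonical form of the swap is the canonical form
lemma pv_canon_swap (p : String × String) : pvCanon (p.2, p.1) = pvCanon p := by
  rcases p with ⟨x, y⟩
  unfold pvCanon
  rcases le_total x y with h | h
  · by_cases h' : y ≤ x
    · have : x = y := le_antisymm h h'
      simp [this]
    · simp [h, h']
  · by_cases h' : x ≤ y
    · have : x = y := le_antisymm h' h
      simp [this]
    · simp [h, h']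

lemma pv_canon_mem (p k : String × String) (h : pvCanon p = k) : p = k ∨ p = (k.2, k.1) := by
  unfold pvCanon at h
  split_ifs at h
  · exact Or.inl h
  · right; rcases p with ⟨x, y⟩; cases h; rfl

lemma pv_canon_self (p : String × String) (h : p.1 = p.2) : pvCanon p = p := by
  unfold pvCanon; rw [if_pos (le_of_eq h)]

-- bucket contents: the distinct forward pairs with this canonical form, in first-occurrence order
lemma pv_bucket_getD (l : List (String × String)) :
    ∀ k, (l.foldl pvStep PySem.Dict.empty).getD k []
      = (PySem.Set.ofList l).filter (fun p => pvCanon p == k) := by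
  induction l using List.reverseRecOn with
  | nil => intro k; simp [PySem.Set.ofList_nil, PySem.Dict.getD_empty]
  | append_singleton l p ih =>
    intro k
    rw [List.foldl_append, List.foldl_cons, List.foldl_nil,
        PySem.Set.ofList_append_singleton, pvStep]
    by_cases hm : p ∈ PySem.Set.ofList l
    · rw [if_pos (by rw [ih (pvCanon p)]; simp [hm]), ih k,
          PySem.Set.add_of_mem hm]
    · rw [if_neg (by rw [ih (pvCanon p)]; simp [hm]),
          PySem.Set.add_of_not_mem hm, List.filter_append]
      by_cases hk : k = pvCanon p
      · rw [PySem.Dict.getD_insert, if_pos hk, ih (pvCanon p), ← hk]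
        simp [hk.symm]
      · rw [PySem.Dict.getD_insert, if_neg hk, ih k]
        have hk' : ¬ pvCanon p = k := fun h => hk h.symm
        simp [hk']

-- keys of the bucket dict stay unique
lemma pv_bucket_nodup_keys (l : List (String × String)) :
    ∀ d : PySem.Dict (String × String) (List (String × String)),
      d.keys.Nodup → (l.foldl pvStep d).keys.Nodup := by
  induction l with
  | nil => intro d h; exact h
  | cons p t ih =>
    intro d h
    rw [List.foldl_cons]
    apply ih
    unfold pvStep
    split_ifs with hm
    · exact h
    · exact PySem.Dict.nodup_keys_insert _ _ _ h

-- membership in the symmetric set built from the bucket items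
lemma pv_mem_symfold (cond : (String × String) × List (String × String) → Bool) :
    ∀ (its : List ((String × String) × List (String × String)))
      (s : PySem.Set (String × String)) (r : String × String),
      r ∈ its.foldl (fun s kb => if cond kb then PySem.Set.update s kb.2 else s) s
        ↔ r ∈ s ∨ ∃ kb ∈ its, cond kb ∧ r ∈ kb.2 := by
  intro its
  induction its with
  | nil => intro s r; simp
  | cons kb t ih =>
    intro s r
    rw [List.foldl_cons]
    by_cases hc : cond kb = true
    · rw [if_pos hc, ih, PySem.Set.mem_update]
      constructor
      · rintro (⟨h | h⟩ | ⟨kb', hkb', h1, h2⟩)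
        · exact Or.inl h
        · exact Or.inr ⟨kb, List.mem_cons_self, hc, h⟩
        · exact Or.inr ⟨kb', List.mem_cons_of_mem _ hkb', h1, h2⟩
      · rintro (h | ⟨kb', hkb', h1, h2⟩)
        · exact Or.inl (Or.inl h)
        · rcases List.mem_cons.mp hkb' with rfl | hkb'
          · exact Or.inl (Or.inr h2)
          · exact Or.inr ⟨kb', hkb', h1, h2⟩
    · rw [if_neg hc, ih]
      constructor
      · rintro (h | ⟨kb', hkb', h1, h2⟩)
        · exact Or.inl h
        · exact Or.inr ⟨kb', List.mem_cons_of_mem _ hkb', h1, h2⟩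
      · rintro (h | ⟨kb', hkb', h1, h2⟩)
        · exact Or.inl h
        · rcases List.mem_cons.mp hkb' with rfl | hkb'
          · exact absurd h1 (by simp [hc])
          · exact Or.inr ⟨kb', hkb', h1, h2⟩

-- A's first loop, B's bucket loop and the two result loops, reduced to folds over pvFwd
lemma pv_loop1 (data : List (List String)) :
    data.foldl (fun s entry =>
      if 2 ≤ entry.length then
        PySem.Set.add s (PySem.Str.strip (PySem.List.pyGetD entry 0 ""),
                         PySem.Str.strip (PySem.List.pyGetD entry 1 ""))
      else s) PySem.Set.empty
    = (pvFwd data).foldl PySem.Set.add PySem.Set.empty :=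
  pv_fold_entries PySem.Set.add data PySem.Set.empty

lemma pv_loopB (data : List (List String)) :
    data.foldl (fun d e =>
      if 2 ≤ e.length then
        let a := PySem.Str.strip (PySem.List.pyGetD e 0 "")
        let b := PySem.Str.strip (PySem.List.pyGetD e 1 "")
        let key := if a ≤ b then (a, b) else (b, a)
        let bucket := d.getD key []
        if (a, b) ∈ bucket then d else d.insert key (bucket ++ [(a, b)])
      else d) PySem.Dict.empty
    = (pvFwd data).foldl pvStep PySem.Dict.empty :=
  pv_fold_entries pvStep data PySem.Dict.empty

lemma pv_loop2 (S : PySem.Set (String × String)) (data : List (List String))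
    (d : PySem.Dict (String × String) Int) :
    data.foldl (fun d entry =>
      if 2 ≤ entry.length then
        let pair := (PySem.Str.strip (PySem.List.pyGetD entry 1 ""),
                     PySem.Str.strip (PySem.List.pyGetD entry 0 ""))
        if PySem.Set.contains S pair then d.insert pair 1 else d
      else d) d
    = (pvFwd data).foldl (fun d p =>
        if PySem.Set.contains S (p.2, p.1) then d.insert (p.2, p.1) 1 else d) d :=
  pv_fold_entries (fun d p =>
    if PySem.Set.contains S (p.2, p.1) then d.insert (p.2, p.1) 1 else d) data d

-- proof-side names for B's intermediate structures
def pvBuckets (data : List (List String)) : PySem.Dict (String × String) (List (String × String)) :=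
  (pvFwd data).foldl pvStep PySem.Dict.empty

def pvCond (kb : (String × String) × List (String × String)) : Bool :=
  kb.2.length == 2 || kb.1.1 == kb.1.2

def pvSymm (data : List (List String)) : PySem.Set (String × String) :=
  (pvBuckets data).items.foldl
    (fun s kb => if pvCond kb then PySem.Set.update s kb.2 else s) PySem.Set.empty

lemma pv_buckets_nodup (data : List (List String)) : (pvBuckets data).keys.Nodup :=
  pv_bucket_nodup_keys _ _ PySem.Dict.nodup_keys_empty

-- anything in the symmetric set is a forward pair
lemma pv_sym_sub (data : List (List String)) (r : String × String)
    (h : r ∈ pvSymm data) : r ∈ PySem.Set.ofList (pvFwd data) := by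
  rcases ((pv_mem_symfold pvCond _ _ _).mp h) with h | ⟨kb, hkb, _, hr⟩
  · simp at h
  · rcases kb with ⟨k, b⟩
    have hb : (pvBuckets data).getD k [] = b :=
      PySem.Dict.getD_of_mem_items _ hkb (pv_buckets_nodup data) []
    have h3 : r ∈ (PySem.Set.ofList (pvFwd data)).filter (fun p => pvCanon p == k) := by
      rw [← pv_bucket_getD (pvFwd data) k]
      show r ∈ (pvBuckets data).getD k []
      rw [hb]; exact hr
    exact (List.mem_filter.mp h3).1

-- a forward pair whose reverse is also a forward pair lands in the symmetric set
lemma pv_sym_mem (data : List (List String)) (r : String × String)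
    (h1 : r ∈ PySem.Set.ofList (pvFwd data))
    (h2 : (r.2, r.1) ∈ PySem.Set.ofList (pvFwd data)) : r ∈ pvSymm data := by
  have hnd := pv_buckets_nodup data
  set k := pvCanon r with hkdef
  set b := (pvBuckets data).getD k [] with hbdef
  have hb : b = (PySem.Set.ofList (pvFwd data)).filter (fun p => pvCanon p == k) := by
    rw [hbdef]; exact pv_bucket_getD (pvFwd data) k
  have hrb : r ∈ b := by
    rw [hb]; exact List.mem_filter.mpr ⟨h1, by simp [hkdef]⟩
  have hkmem : k ∈ (pvBuckets data).keys := by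
    rw [← PySem.Dict.contains_iff_mem_keys]
    by_contra hc
    have : b = [] := PySem.Dict.getD_of_not_contains _ _ (by simpa using hc)
    rw [this] at hrb; simp at hrb
  have hitems : (k, b) ∈ (pvBuckets data).items := by
    rw [PySem.Dict.items_eq_map_keys _ hnd []]
    exact List.mem_map.mpr ⟨k, hkmem, by rw [← hbdef]⟩
  have hcond : pvCond (k, b) = true := by
    by_cases hpal : r.1 = r.2
    · have hk : k = r := by rw [hkdef]; exact pv_canon_self r hpal
      unfold pvCond
      simp [hk, hpal]
    · have hne : r ≠ (r.2, r.1) := by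
        intro h; apply hpal
        have := congrArg Prod.fst h; simpa using this
      have hswap : (r.2, r.1) ∈ b := by
        rw [hb]
        exact List.mem_filter.mpr ⟨h2, by simp [pv_canon_swap r, hkdef]⟩
      have hbsub : ∀ x ∈ b, x = r ∨ x = (r.2, r.1) := by
        intro x hx
        rw [hb] at hx
        have hcx : pvCanon x = k := by
          have := (List.mem_filter.mp hx).2; simpa using this
        rcases pv_canon_mem x k hcx with hx1 | hx2 <;>
          rcases pv_canon_mem r k hkdef.symm with hr1 | hr2
        · exact Or.inl (by rw [hx1, ← hr1])
        · right; rw [hx1, hr2]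
        · right; rw [hx2, ← hr1]
        · left; rw [hx2, hr2]
      have hbnd : b.Nodup := by
        rw [hb]; exact (PySem.Set.nodup_ofList _).filter _
      have hperm : b.Perm [r, (r.2, r.1)] := by
        rw [List.perm_ext_iff_of_nodup hbnd (by simp [hne])]
        intro x
        constructor
        · intro hx; rcases hbsub x hx with rfl | rfl <;> simp
        · intro hx
          rcases List.mem_cons.mp hx with rfl | hx
          · exact hrb
          · rcases List.mem_cons.mp hx with rfl | hx
            · exact hswap
            · simp at hx
      have hlen : b.length = 2 := by rw [hperm.length_eq]; rfl
      unfold pvCond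
      simp [hlen]
  exact (pv_mem_symfold pvCond _ _ _).mpr (Or.inr ⟨(k, b), hitems, hcond, hrb⟩)

-- the two membership tests agree on every reversed forward pair (Bool form)
lemma pv_contains_eq (data : List (List String)) (p : String × String)
    (hp : p ∈ pvFwd data) :
    PySem.Set.contains (PySem.Set.ofList (pvFwd data)) (p.2, p.1)
      = PySem.Set.contains (pvSymm data) (p.2, p.1) := by
  have hpF : ((p.2, p.1).2, (p.2, p.1).1) ∈ PySem.Set.ofList (pvFwd data) := by
    rcases p with ⟨a, b⟩
    exact (PySem.Set.mem_ofList _ _).mpr hp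
  by_cases hm : (p.2, p.1) ∈ PySem.Set.ofList (pvFwd data)
  · have h2 : (p.2, p.1) ∈ pvSymm data := pv_sym_mem data (p.2, p.1) hm hpF
    rw [(PySem.Set.contains_iff _ _).mpr hm, (PySem.Set.contains_iff _ _).mpr h2]
  · have h2 : (p.2, p.1) ∉ pvSymm data := fun h => hm (pv_sym_sub data _ h)
    have e1 : (PySem.Set.ofList (pvFwd data)).contains (p.2, p.1) = false :=
      Bool.eq_false_iff.mpr (fun h => hm ((PySem.Set.contains_iff _ _).mp h))
    have e2 : (pvSymm data).contains (p.2, p.1) = false :=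
      Bool.eq_false_iff.mpr (fun h => h2 ((PySem.Set.contains_iff _ _).mp h))
    rw [e1, e2]

-- ===== VERDICT (by name: the statement is the Claim_ definition above) =====
theorem count_reverse_pairs_spec : Claim_equal_count_reverse_pairs := by
  intro data _
  show count_reverse_pairs data = count_reverse_pairs_alt data
  unfold count_reverse_pairs count_reverse_pairs_alt
  simp only []
  rw [pv_loop1, pv_loopB, pv_loop2, pv_loop2]
  have hS : (pvFwd data).foldl PySem.Set.add PySem.Set.empty
      = PySem.Set.ofList (pvFwd data) := (PySem.Set.ofList_eq_foldl _).symm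
  rw [hS]
  have hd :
      (pvFwd data).foldl (fun d p =>
        if PySem.Set.contains (PySem.Set.ofList (pvFwd data)) (p.2, p.1)
        then d.insert (p.2, p.1) 1 else d)
        (PySem.Dict.empty : PySem.Dict (String × String) Int)
      = (pvFwd data).foldl (fun d p =>
        if PySem.Set.contains (pvSymm data) (p.2, p.1)
        then d.insert (p.2, p.1) 1 else d)
        (PySem.Dict.empty : PySem.Dict (String × String) Int) := by
    apply PySem.List.foldl_congr_mem
    intro acc p hp
    rw [pv_contains_eq data p hp]
  refine congrArg
    (fun d : PySem.Dict (String × String) Int =>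
      d.items.map (fun q => (q.1.1, q.1.2, q.2))) ?_
  exact hd.trans rfl
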